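-- pv_equiv track=rewrite | github.com/Ryu0w0/BERT | common/util/text_processing.py | preprocessing_text
-- ===== SOURCE A (Python) =====
-- import string
--
-- def preprocessing_text(text):
--     """Pre-processing to each token"""
--     # Replace symbols with white space except period and comma
--     for p in string.punctuation:
--         if (p == ".") or (p == ","):
--             continue
--         else:
--             text = text.replace(p, " ")
--
--     text = text.replace(".", " . ")
--     text = text.replace(",", " , ")
--     return text
-- ===== SOURCE B (Python) =====
-- import string
--
--
-- def preprocessing_text(text):
--     """Pre-processing to each token"""
--     # Single pass: blank out punctuation except period/comma, which get padded.
--     blanks = {c for c in string.punctuation if c not in {'.', ','}}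
--     out = []
--     for ch in text:
--         if ch in blanks:
--             out.append(' ')
--         elif ch == '.':
--             out.append(' . ')
--         elif ch == ',':
--             out.append(' , ')
--         else:
--             out.append(ch)
--     return ''.join(out)
-- ===== Notes on version B (the rewrite author's own statement) =====
-- stated objective: alternative
-- what changed: Replaces 32 whole-string .replace passes with a single character-level pass that maps each char through a precomputed punctuation set and joins the pieces; not faster in CPython, where str.replace runs in C.
import Mathlib
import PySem

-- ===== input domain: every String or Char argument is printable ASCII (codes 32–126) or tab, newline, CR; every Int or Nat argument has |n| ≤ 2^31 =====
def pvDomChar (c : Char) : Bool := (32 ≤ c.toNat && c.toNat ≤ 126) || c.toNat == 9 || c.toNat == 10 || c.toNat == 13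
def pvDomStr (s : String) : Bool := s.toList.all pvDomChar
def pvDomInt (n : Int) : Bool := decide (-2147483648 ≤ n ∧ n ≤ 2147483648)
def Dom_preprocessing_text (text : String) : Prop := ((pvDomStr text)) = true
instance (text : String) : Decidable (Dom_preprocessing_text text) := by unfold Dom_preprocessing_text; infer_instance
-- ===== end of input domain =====

-- B replaces A's 32 whole-string .replace passes by one character-level pass; return value only.

-- string.punctuation, as the list of its characters
def pyPunct : List Char :=
  ['!', '"', '#', '$', '%', '&', '\'', '(', ')', '*', '+', ',', '-', '.', '/',
   ':', ';', '<', '=', '>', '?', '@', '[', '\\', ']', '^', '_', '`', '{', '|', '}', '~']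

-- ===== PORT A =====
def preprocessing_text (text : String) : String :=
  -- for p in string.punctuation: if p == "." or p == ",": continue else: text = text.replace(p, " ")
  let t1 := pyPunct.foldl
    (fun t p => if p == '.' || p == ',' then t else PySem.Str.replace t (String.ofList [p]) " ") text
  -- text = text.replace(".", " . "); text = text.replace(",", " , ")
  let t2 := PySem.Str.replace t1 "." " . "
  PySem.Str.replace t2 "," " , "

-- ===== PORT B =====
-- blanks = {c for c in string.punctuation if c not in {'.', ','}}
def pyBlanks : PySem.Set Char :=
  PySem.Set.ofList (pyPunct.filter (fun c => !(c == '.' || c == ',')))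

def preprocessing_text_alt (text : String) : String :=
  let out := text.toList.foldl
    (fun acc ch =>
      if pyBlanks.contains ch then acc ++ [" "]
      else if ch == '.' then acc ++ [" . "]
      else if ch == ',' then acc ++ [" , "]
      else acc ++ [String.ofList [ch]]) ([] : List String)
  PySem.Str.join "" out

-- ===== PRECONDITION & SPEC =====
def Spec_preprocessing_text (text : String) (out : String) : Prop := out = preprocessing_text_alt text
instance (text : String) (out : String) : Decidable (Spec_preprocessing_text text out) := by unfold Spec_preprocessing_text; infer_instance

-- ===== CLAIM (what is proved, stated in full; the proofs are below) =====
def Claim_equal_preprocessing_text : Prop := ∀ (text : String), Dom_preprocessing_text text → Spec_preprocessing_text text (preprocessing_text text)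

-- ===== LEMMAS AND PROOFS =====

-- text.replace(old, new) with a single-char old substitutes per character
theorem pv_go_single (c : Char) (new : List Char) :
    ∀ (l : List Char) (fuel : Nat) (acc : List Char), l.length ≤ fuel →
      PySem.Chars.replace.go [c] new fuel l acc
        = acc.reverse ++ l.flatMap (fun x => if x = c then new else [x]) := by
  intro l
  induction l with
  | nil =>
    intro fuel acc _
    cases fuel <;> simp [PySem.Chars.replace.go]
  | cons c' t ih =>
    intro fuel acc h
    cases fuel with
    | zero => simp at h
    | succ f =>
      by_cases hc : c' = c
      · subst hc
        simp [PySem.Chars.replace.go, List.isPrefixOf, ih f _ (by simpa using h)]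
      · simp [PySem.Chars.replace.go, List.isPrefixOf, hc, Ne.symm hc, ih f _ (by simpa using h)]

theorem pv_replace_single (cs : List Char) (c : Char) (new : List Char) :
    PySem.Chars.replace cs [c] new = cs.flatMap (fun x => if x = c then new else [x]) := by
  simpa [PySem.Chars.replace] using pv_go_single c new cs cs.length [] le_rfl

theorem pv_flatMap_singleton_map (l : List Char) (p r : Char) :
    l.flatMap (fun x => if x = p then [r] else [x]) = l.map (fun x => if x = p then r else x) := by
  induction l with
  | nil => rfl
  | cons a t ih => by_cases h : a = p <;> simp [h, ih]

-- A's punctuation loop, characterised as a single map over the characters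
theorem pv_foldA (ps : List Char) : ∀ (t : String),
    (ps.foldl (fun t p => if p == '.' || p == ',' then t
                          else PySem.Str.replace t (String.ofList [p]) " ") t).toList
      = t.toList.map (fun x => if x ∈ ps ∧ x ≠ '.' ∧ x ≠ ',' then ' ' else x) := by
  induction ps with
  | nil => intro t; simp
  | cons p ps ih =>
    intro t
    by_cases hp : p = '.' ∨ p = ','
    · have hb : (p == '.' || p == ',') = true := by
        rcases hp with h | h <;> simp [h]
      rw [List.foldl_cons, if_pos hb, ih]
      apply List.map_congr_left
      intro x _
      by_cases hx : x = p
      · subst hx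
        rcases hp with h | h <;> simp [h]
      · simp [List.mem_cons, hx]
    · push Not at hp
      have hb : (p == '.' || p == ',') = false := by simp [hp.1, hp.2]
      rw [List.foldl_cons, if_neg (by simp [hb]), ih]
      rw [show (PySem.Str.replace t (String.ofList [p]) " ").toList
            = t.toList.map (fun x => if x = p then ' ' else x) by
        rw [PySem.Str.toList_replace]
        simp only [String.toList_ofList]
        rw [show (" ").toList = [' '] from rfl]
        rw [pv_replace_single, pv_flatMap_singleton_map]]
      rw [List.map_map]
      apply List.map_congr_left
      intro x _
      by_cases hx : x = p
      · subst hx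
        simp [Function.comp, hp.1, hp.2]
      · by_cases hm : x ∈ ps <;> simp [Function.comp, hx, hm]

theorem pv_join_nil_flatten (parts : List (List Char)) :
    PySem.Chars.join [] parts = parts.flatten := by
  show List.intercalate [] parts = parts.flatten
  induction parts with
  | nil => rfl
  | cons a t ih => cases t <;> simp_all [List.intercalate, List.intersperse]

-- B's loop, characterised as a map over the characters
theorem pv_foldB (l : List Char) (acc : List String) :
    l.foldl (fun acc ch =>
      if pyBlanks.contains ch then acc ++ [" "]
      else if ch == '.' then acc ++ [" . "]
      else if ch == ',' then acc ++ [" , "]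
      else acc ++ [String.ofList [ch]]) acc
    = acc ++ l.map (fun ch =>
      if pyBlanks.contains ch then (" " : String)
      else if ch == '.' then " . "
      else if ch == ',' then " , "
      else String.ofList [ch]) := by
  induction l generalizing acc with
  | nil => simp
  | cons a t ih =>
    rw [List.foldl_cons, List.map_cons]
    split_ifs <;> rw [ih] <;> simp

-- the per-character substitution performed by B
theorem pv_pointwise (x : Char) :
    ((fun y => if y = '.' then (" . ").toList else [y])
        ((fun z => if z ∈ pyPunct ∧ z ≠ '.' ∧ z ≠ ',' then ' ' else z) x)).flatMap
      (fun y => if y = ',' then (" , ").toList else [y])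
    = (if pyBlanks.contains x then (" ").toList
       else if x == '.' then (" . ").toList
       else if x == ',' then (" , ").toList
       else (String.ofList [x]).toList) := by
  by_cases hx : x ∈ pyPunct
  · fin_cases hx <;> decide
  · have hdot : x ≠ '.' := fun h => hx (by rw [h]; decide)
    have hcom : x ≠ ',' := fun h => hx (by rw [h]; decide)
    have hb : x ∉ pyBlanks :=
      fun hmem => hx (List.mem_of_mem_filter ((PySem.Set.mem_ofList _ _).mp hmem))
    simp [hx, hdot, hcom, hb]

-- ===== VERDICT (by name: the statement is the Claim_ definition above) =====
theorem preprocessing_text_spec : Claim_equal_preprocessing_text := by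
  intro text _
  unfold Spec_preprocessing_text
  apply String.toList_inj.mp
  unfold preprocessing_text preprocessing_text_alt
  rw [PySem.Str.toList_replace, PySem.Str.toList_replace, pv_foldA]
  rw [show ("," : String).toList = [','] from rfl, show ("." : String).toList = ['.'] from rfl]
  rw [pv_replace_single, pv_replace_single]
  rw [List.flatMap_map, List.flatMap_assoc]
  rw [PySem.Str.toList_join]
  rw [pv_foldB]
  rw [List.nil_append, List.map_map]
  rw [show ("" : String).toList = [] from rfl, pv_join_nil_flatten, ← List.flatMap_def]
  congr 1
  funext x
  simpa [Function.comp, apply_ite String.toList] using pv_pointwise x
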